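-- pv_equiv track=rewrite | github.com/csakilan/FoundryBackend | CFCreators/singleServiceCreator/RDS_creation.py | sanitize_rds_identifier
-- ===== SOURCE A (Python) =====
-- def sanitize_rds_identifier(identifier: str) -> str:
--     """
--     Sanitize a string to meet RDS identifier requirements.
--
--     RDS identifiers must:
--     - Be 1-63 characters long
--     - Contain only lowercase letters, numbers, and hyphens
--     - Start with a letter
--     - Not end with a hyphen or contain two consecutive hyphens
--
--     Args:
--         identifier: Raw identifier string
--
--     Returns:
--         Sanitized identifier that meets RDS requirements
--     """
--     # Convert to lowercase
--     identifier = identifier.lower()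
--
--     # Replace invalid characters with hyphens
--     valid_chars = []
--     for char in identifier:
--         if char.isalnum():
--             valid_chars.append(char)
--         elif char in ['-', '_', ' ']:
--             valid_chars.append('-')
--         else:
--             valid_chars.append('-')
--
--     # Join and remove consecutive hyphens
--     identifier = ''.join(valid_chars)
--     while '--' in identifier:
--         identifier = identifier.replace('--', '-')
--
--     # Remove leading/trailing hyphens
--     identifier = identifier.strip('-')
--
--     # Ensure it starts with a letter
--     if identifier and not identifier[0].isalpha():
--         identifier = 'db' + identifier
--
--     # Ensure it's not empty and not too long
--     if not identifier:
--         identifier = 'database'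
--     elif len(identifier) > 63:
--         identifier = identifier[:63].rstrip('-')
--
--     return identifier
-- ===== SOURCE B (Python) =====
-- def sanitize_rds_identifier(identifier: str) -> str:
--     # Single left-to-right pass: lowercase alphanumerics are kept, any run of
--     # other characters becomes one hyphen, leading hyphens are never emitted.
--     out = []
--     for ch in identifier.lower():
--         if ch.isalnum():
--             out.append(ch)
--         elif out and out[-1] != '-':
--             out.append('-')
--     if out and out[-1] == '-':
--         out.pop()
--     s = ''.join(out)
--     if s and not s[0].isalpha():
--         s = 'db' + s
--     if not s:
--         s = 'database'
--     elif len(s) > 63: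
--         s = s[:63].rstrip('-')
--     return s
-- ===== Notes on version B (the rewrite author's own statement) =====
-- stated objective: alternative
-- what changed: A maps characters and then repeatedly rewrites the whole string with replace until no double hyphen remains, finally stripping edge hyphens; B makes one left-to-right pass that emits kept characters and at most one hyphen per run of invalid characters, never emitting a leading hyphen and dropping at most one trailing hyphen.
import Mathlib
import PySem

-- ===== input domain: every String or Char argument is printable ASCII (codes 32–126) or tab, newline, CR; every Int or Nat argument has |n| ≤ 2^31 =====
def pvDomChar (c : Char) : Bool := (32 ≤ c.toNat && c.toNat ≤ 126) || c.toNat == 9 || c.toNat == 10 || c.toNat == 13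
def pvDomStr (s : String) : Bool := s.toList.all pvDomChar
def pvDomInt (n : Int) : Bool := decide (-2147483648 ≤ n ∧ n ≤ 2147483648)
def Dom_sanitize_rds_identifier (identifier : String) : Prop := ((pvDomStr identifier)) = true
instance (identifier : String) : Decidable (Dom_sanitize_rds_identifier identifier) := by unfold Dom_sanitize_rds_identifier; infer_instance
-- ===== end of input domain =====

-- B replaces A's repeated replace('--','-') passes by a single left-to-right pass that
-- collapses each run of non-alphanumerics to one hyphen and never emits leading hyphens.

-- ===== PORT A =====
-- exact port of str.rstrip('-') (no PySem primitive for rstrip with an argument)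
def rstripHy (l : List Char) : List Char := (List.dropWhile (fun c => c == '-') l.reverse).reverse

-- proof-side model of one replace('--','-') pass; needed above port A for loopA's termination
def rep1 : List Char → List Char
  | [] => []
  | [a] => [a]
  | a :: b :: t => if a = '-' ∧ b = '-' then '-' :: rep1 t else a :: rep1 (b :: t)

theorem replace_go_eq (fuel : Nat) (l acc : List Char) (h : l.length ≤ fuel) :
    PySem.Chars.replace.go ['-', '-'] ['-'] fuel l acc = acc.reverse ++ rep1 l := by
  induction fuel generalizing l acc with
  | zero =>
    have : l = [] := List.length_eq_zero_iff.mp (Nat.le_antisymm h (Nat.zero_le _))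
    subst this
    simp [PySem.Chars.replace.go, rep1]
  | succ fuel ih =>
    match l with
    | [] => simp [PySem.Chars.replace.go, rep1]
    | [c] =>
      have hpre : (['-', '-'].isPrefixOf [c]) = false := by
        simp [List.isPrefixOf]
      simp only [PySem.Chars.replace.go, hpre, Bool.false_eq_true, if_false]
      rw [ih [] (c :: acc) (by simp)]
      simp [rep1]
    | a :: b :: t =>
      by_cases hab : a = '-' ∧ b = '-'
      · obtain ⟨rfl, rfl⟩ := hab
        have hpre : (['-', '-'].isPrefixOf ('-' :: '-' :: t)) = true := by
          simp [List.isPrefixOf]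
        simp only [PySem.Chars.replace.go, hpre, if_pos]
        rw [ih (List.drop ['-', '-'].length ('-' :: '-' :: t)) (['-'].reverse ++ acc)
            (by simp at h ⊢; omega)]
        simp [rep1]
      · have hpre : (['-', '-'].isPrefixOf (a :: b :: t)) = false := by
          simp only [List.isPrefixOf, Bool.and_true, Bool.and_eq_false_iff, beq_eq_false_iff_ne,
            ne_eq]
          by_cases ha : a = '-'
          · right; intro hb; exact hab ⟨ha, hb.symm⟩
          · left; intro h1; exact ha h1.symm
        simp only [PySem.Chars.replace.go, hpre, Bool.false_eq_true, if_false]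
        rw [ih (b :: t) (a :: acc) (by simp at h ⊢; omega)]
        simp [rep1, hab]

theorem replace_eq_rep1 (l : List Char) :
    PySem.Chars.replace l ['-', '-'] ['-'] = rep1 l := by
  have := replace_go_eq l.length l [] le_rfl
  simpa [PySem.Chars.replace] using this

theorem rep1_length_le (l : List Char) : (rep1 l).length ≤ l.length := by
  fun_induction rep1 l with
  | case1 => simp
  | case2 a => simp
  | case3 a b t hab ih => simp only [List.length_cons]; omega
  | case4 a b t hab ih => simp only [List.length_cons] at ih ⊢; omega

theorem rep1_length_lt (l : List Char) (h : ['-', '-'] <:+: l) :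
    (rep1 l).length < l.length := by
  match l with
  | [] => simp at h
  | [a] => exact absurd h.length_le (by simp)
  | a :: b :: t =>
    by_cases hab : a = '-' ∧ b = '-'
    · have := rep1_length_le t
      simp only [rep1, if_pos hab, List.length_cons]
      omega
    · have hbt : ['-', '-'] <:+: (b :: t) := by
        rcases List.infix_cons_iff.mp h with hp | hi
        · exfalso
          rcases List.prefix_cons_iff.mp hp with h1 | ⟨t', h1, h2⟩
          · simp at h1
          · injection h1 with h1a h1b
            subst h1b
            rcases List.prefix_cons_iff.mp h2 with h3 | ⟨t'', h3, h4⟩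
            · simp at h3
            · injection h3 with h3a h3b
              exact hab ⟨h1a.symm, h3a.symm⟩
        · exact hi
      have := rep1_length_lt (b :: t) hbt
      simp only [rep1, if_neg hab, List.length_cons] at this ⊢
      omega

-- port of:  while '--' in identifier: identifier = identifier.replace('--', '-')
def loopA (l : List Char) : List Char :=
  if h : PySem.Chars.isIn ['-', '-'] l = true then
    loopA (PySem.Chars.replace l ['-', '-'] ['-'])
  else l
termination_by l.length
decreasing_by
  rw [replace_eq_rep1]
  exact rep1_length_lt l ((PySem.Chars.isIn_iff_infix _ _).mp h)

def sanitize_rds_identifier (identifier : String) : String :=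
  let m := PySem.Chars.lower identifier.toList
  let validChars := m.foldl (fun acc c =>
      if PySem.Chars.isalnum c then acc ++ [c]
      else if c = '-' ∨ c = '_' ∨ c = ' ' then acc ++ ['-']
      else acc ++ ['-']) []
  let collapsed := loopA validChars
  let stripped := PySem.Chars.stripChars collapsed ['-']
  let s1 := match stripped with
    | [] => stripped
    | c :: _ => if !PySem.Chars.isalpha c then 'd' :: 'b' :: stripped else stripped
  let s2 := if s1 = [] then "database".toList
            else if 63 < s1.length then rstripHy (s1.take 63) else s1
  String.ofList s2

-- ===== PORT B =====
-- python:  if out and out[-1] == '-': out.pop()   (out is kept reversed, so out[-1] = head)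
def popHyphen (rev : List Char) : List Char :=
  match rev with
  | '-' :: t => t
  | _ => rev

def sanitize_rds_identifier_alt (identifier : String) : String :=
  -- out is kept reversed: Python's append = cons, out[-1] = head, pop = tail
  let rev := (PySem.Chars.lower identifier.toList).foldl (fun acc ch =>
      if PySem.Chars.isalnum ch then ch :: acc
      else match acc with
        | [] => acc
        | d :: _ => if d != '-' then '-' :: acc else acc) []
  let s := (popHyphen rev).reverse
  let s1 := match s with
    | [] => s
    | c :: _ => if !PySem.Chars.isalpha c then 'd' :: 'b' :: s else s
  let s2 := if s1 = [] then "database".toList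
            else if 63 < s1.length then rstripHy (s1.take 63) else s1
  String.ofList s2

-- ===== PRECONDITION & SPEC =====
def Spec_sanitize_rds_identifier (identifier : String) (out : String) : Prop := out = sanitize_rds_identifier_alt identifier
instance (identifier : String) (out : String) : Decidable (Spec_sanitize_rds_identifier identifier out) := by unfold Spec_sanitize_rds_identifier; infer_instance

-- ===== CLAIM (what is proved, stated in full; the proofs are below) =====
def Claim_equal_sanitize_rds_identifier : Prop := ∀ (identifier : String), Dom_sanitize_rds_identifier identifier → Spec_sanitize_rds_identifier identifier (sanitize_rds_identifier identifier)

-- ===== LEMMAS AND PROOFS =====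

-- collapse every run of hyphens to a single hyphen (fixpoint of A's while-loop)
def squeeze : List Char → List Char
  | [] => []
  | [a] => [a]
  | a :: b :: t => if a = '-' ∧ b = '-' then squeeze (b :: t) else a :: squeeze (b :: t)

def lstripH (l : List Char) : List Char := List.dropWhile (fun c => c == '-') l

-- state machine of B's single pass: the Bool is "last emitted char exists and is not '-'"
def runE : Bool → List Char → List Char
  | _, [] => []
  | b, c :: t => if c = '-' then (if b then '-' :: runE false t else runE false t)
                 else c :: runE true t

theorem head?_rep1 (l : List Char) : (rep1 l).head? = l.head? := by
  fun_induction rep1 l <;> simp_all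

theorem squeeze_cons_ne (a : Char) (t : List Char) (h : a ≠ '-') :
    squeeze (a :: t) = a :: squeeze t := by
  cases t with
  | nil => rfl
  | cons b t => simp [squeeze, h]

theorem head?_squeeze (l : List Char) : (squeeze l).head? = l.head? := by
  fun_induction squeeze l <;> simp_all

theorem squeeze_rep1 (l : List Char) : squeeze (rep1 l) = squeeze l := by
  fun_induction rep1 l with
  | case1 => rfl
  | case2 a => rfl
  | case3 a b t hab ih =>
    obtain ⟨rfl, rfl⟩ := hab
    show squeeze ('-' :: rep1 t) = squeeze ('-' :: '-' :: t)
    rw [show squeeze ('-' :: '-' :: t) = squeeze ('-' :: t) from by simp [squeeze]]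
    cases t with
    | nil => rfl
    | cons c t' =>
      by_cases hc : c = '-'
      · subst hc
        obtain ⟨u, hu⟩ : ∃ u, rep1 ('-' :: t') = '-' :: u := by
          have h1 := head?_rep1 ('-' :: t')
          cases hr : rep1 ('-' :: t') with
          | nil => rw [hr] at h1; simp at h1
          | cons x u => rw [hr] at h1; simp at h1; exact ⟨u, by rw [h1]⟩
        rw [hu, show squeeze ('-' :: '-' :: u) = squeeze ('-' :: u) from by simp [squeeze],
          ← hu, ih, show squeeze ('-' :: '-' :: t') = squeeze ('-' :: t') from by simp [squeeze]]
      · obtain ⟨u, hu⟩ : ∃ u, rep1 (c :: t') = c :: u := by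
          have h1 := head?_rep1 (c :: t')
          cases hr : rep1 (c :: t') with
          | nil => rw [hr] at h1; simp at h1
          | cons x u => rw [hr] at h1; simp at h1; exact ⟨u, by rw [h1]⟩
        rw [hu, show squeeze ('-' :: c :: u) = '-' :: squeeze (c :: u) from by simp [squeeze, hc],
          ← hu, ih, show squeeze ('-' :: c :: t') = '-' :: squeeze (c :: t') from by
            simp [squeeze, hc]]
  | case4 a b t hab ih =>
    show squeeze (a :: rep1 (b :: t)) = squeeze (a :: b :: t)
    obtain ⟨u, hu⟩ : ∃ u, rep1 (b :: t) = b :: u := by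
      have h1 := head?_rep1 (b :: t)
      cases hr : rep1 (b :: t) with
      | nil => rw [hr] at h1; simp at h1
      | cons x u => rw [hr] at h1; simp at h1; exact ⟨u, by rw [h1]⟩
    rw [hu, show squeeze (a :: b :: u) = if a = '-' ∧ b = '-' then squeeze (b :: u)
        else a :: squeeze (b :: u) from rfl, if_neg hab, ← hu, ih,
      show squeeze (a :: b :: t) = if a = '-' ∧ b = '-' then squeeze (b :: t)
        else a :: squeeze (b :: t) from rfl, if_neg hab]

theorem squeeze_of_not_infix (l : List Char) (h : ¬ ['-', '-'] <:+: l) : squeeze l = l := by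
  fun_induction squeeze l with
  | case1 => rfl
  | case2 a => rfl
  | case3 a b t hab ih =>
    exfalso
    obtain ⟨rfl, rfl⟩ := hab
    exact h ⟨[], t, rfl⟩
  | case4 a b t hab ih =>
    rw [ih (fun hi => h (List.infix_cons_iff.mpr (Or.inr hi)))]

theorem loopA_eq_squeeze (l : List Char) : loopA l = squeeze l := by
  fun_induction loopA l with
  | case1 l _ ih =>
    rw [ih, replace_eq_rep1, squeeze_rep1]
  | case2 l h =>
    rw [squeeze_of_not_infix l
      (fun hi => h ((PySem.Chars.isIn_iff_infix _ _).mpr hi))]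

theorem lstripH_of_head_ne (c : Char) (t : List Char) (h : c ≠ '-') :
    lstripH (c :: t) = c :: t := by
  simp [lstripH, h]

theorem lstripH_cons_hyphen (t : List Char) : lstripH ('-' :: t) = lstripH t := by
  simp [lstripH]

theorem lstripH_head_ne (l : List Char) (c : Char) (u : List Char)
    (h : lstripH l = c :: u) : c ≠ '-' := by
  induction l with
  | nil => simp [lstripH] at h
  | cons a t ih =>
    by_cases ha : a = '-'
    · subst ha
      exact ih (by rwa [lstripH_cons_hyphen] at h)
    · rw [lstripH_of_head_ne a t ha] at h
      injection h with h1 _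
      exact h1 ▸ ha

theorem lstripH_idem (l : List Char) : lstripH (lstripH l) = lstripH l := by
  cases h : lstripH l with
  | nil => simp [lstripH]
  | cons c u => exact lstripH_of_head_ne c u (lstripH_head_ne l c u h)

theorem squeeze_cons_hyphen (t : List Char) :
    squeeze ('-' :: t) = '-' :: lstripH (squeeze t) := by
  fun_induction rep1 t with
  | case1 => rfl
  | case2 a =>
    by_cases ha : a = '-'
    · subst ha; rfl
    · rw [show squeeze ['-', a] = '-' :: squeeze [a] from by simp [squeeze, ha]]
      simp [squeeze, lstripH, ha]
  | case3 a b u hab ih =>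
    obtain ⟨rfl, rfl⟩ := hab
    rw [show squeeze ('-' :: '-' :: '-' :: u) = squeeze ('-' :: '-' :: u) from by simp [squeeze],
      show squeeze ('-' :: '-' :: u) = squeeze ('-' :: u) from by simp [squeeze]]
    rw [ih, lstripH_cons_hyphen, lstripH_idem]
  | case4 a b u hab ih =>
    by_cases ha : a = '-'
    · subst ha
      have hb : b ≠ '-' := fun hb => hab ⟨rfl, hb⟩
      rw [show squeeze ('-' :: '-' :: b :: u) = squeeze ('-' :: b :: u) from by simp [squeeze],
        show squeeze ('-' :: b :: u) = '-' :: squeeze (b :: u) from by simp [squeeze, hb]]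
      rw [lstripH_cons_hyphen]
      obtain ⟨v, hv⟩ : ∃ v, squeeze (b :: u) = b :: v := by
        have h1 := head?_squeeze (b :: u)
        cases hr : squeeze (b :: u) with
        | nil => rw [hr] at h1; simp at h1
        | cons x v => rw [hr] at h1; simp at h1; exact ⟨v, by rw [h1]⟩
      rw [hv, lstripH_of_head_ne b v hb]
    · rw [show squeeze ('-' :: a :: b :: u) = '-' :: squeeze (a :: b :: u) from by
        simp [squeeze, ha]]
      obtain ⟨v, hv⟩ : ∃ v, squeeze (a :: b :: u) = a :: v := by
        have h1 := head?_squeeze (a :: b :: u)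
        cases hr : squeeze (a :: b :: u) with
        | nil => rw [hr] at h1; simp at h1
        | cons x v => rw [hr] at h1; simp at h1; exact ⟨v, by rw [h1]⟩
      rw [hv, lstripH_of_head_ne a v ha]

theorem runE_spec (t : List Char) :
    runE true t = squeeze t ∧ runE false t = lstripH (squeeze t) := by
  induction t with
  | nil => simp [runE, squeeze, lstripH]
  | cons c t ih =>
    by_cases hc : c = '-'
    · subst hc
      constructor
      · rw [show runE true ('-' :: t) = '-' :: runE false t from by simp [runE],
          ih.2, squeeze_cons_hyphen]
      · rw [show runE false ('-' :: t) = runE false t from by simp [runE],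
          ih.2, squeeze_cons_hyphen, lstripH_cons_hyphen, lstripH_idem]
    · have h1 : ∀ b, runE b (c :: t) = c :: runE true t := by
        intro b; simp [runE, hc]
      rw [squeeze_cons_ne c t hc]
      constructor
      · rw [h1, ih.1]
      · rw [h1, ih.1, lstripH_of_head_ne c _ hc]

theorem isChain_squeeze (l : List Char) :
    List.IsChain (fun a b => ¬(a = '-' ∧ b = '-')) (squeeze l) := by
  fun_induction squeeze l with
  | case1 => simp
  | case2 a => simp
  | case3 a b t hab ih => exact ih
  | case4 a b t hab ih =>
    refine List.isChain_cons.mpr ⟨?_, ih⟩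
    intro y hy
    rw [head?_squeeze (b :: t)] at hy
    simp only [List.head?_cons, Option.mem_def, Option.some.injEq] at hy
    subst hy
    exact hab

-- j-side version of B's fold step (the input char is already mapped to '-' or kept)
def stepJ (acc : List Char) (c : Char) : List Char :=
  if c != '-' then c :: acc
  else match acc with
    | [] => acc
    | d :: _ => if d != '-' then '-' :: acc else acc

def stOf (acc : List Char) : Bool :=
  match acc with
  | [] => false
  | c :: _ => c != '-'

theorem foldl_stepJ_eq_runE (t : List Char) (acc : List Char) :
    List.foldl stepJ acc t = (runE (stOf acc) t).reverse ++ acc := by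
  induction t generalizing acc with
  | nil => simp [runE]
  | cons c t ih =>
    by_cases hc : c = '-'
    · subst hc
      match acc with
      | [] =>
        rw [show List.foldl stepJ [] ('-' :: t) = List.foldl stepJ [] t from rfl, ih []]
        simp [stOf, runE]
      | d :: acc' =>
        by_cases hd : d = '-'
        · subst hd
          rw [show List.foldl stepJ ('-' :: acc') ('-' :: t) =
              List.foldl stepJ ('-' :: acc') t from rfl, ih ('-' :: acc')]
          simp [stOf, runE]
        · rw [show List.foldl stepJ (d :: acc') ('-' :: t) =
              List.foldl stepJ ('-' :: d :: acc') t from by simp [List.foldl_cons, stepJ, hd],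
            ih ('-' :: d :: acc')]
          simp [stOf, runE, hd]
    · rw [show List.foldl stepJ acc (c :: t) = List.foldl stepJ (c :: acc) t from by
        simp [List.foldl_cons, stepJ, hc], ih (c :: acc)]
      have : runE (stOf acc) (c :: t) = c :: runE true t := by simp [runE, hc]
      rw [this]
      have hb : (c == '-') = false := by simp [hc]
      simp [stOf, bne, hb]

theorem g_isalnum_ne (c : Char) (h : PySem.Chars.isalnum c = true) : c ≠ '-' := by
  rintro rfl
  exact absurd h (by decide)

-- B's fold over the lowered chars equals the j-side fold over the mapped chars
theorem foldl_stepB_eq (m : List Char) :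
    m.foldl (fun acc ch =>
      if PySem.Chars.isalnum ch then ch :: acc
      else match acc with
        | [] => acc
        | d :: _ => if d != '-' then '-' :: acc else acc) [] =
    List.foldl stepJ [] (m.map (fun c => if PySem.Chars.isalnum c then c else '-')) := by
  rw [List.foldl_map]
  congr 1
  funext acc c
  by_cases h : PySem.Chars.isalnum c
  · simp [stepJ, h, bne, g_isalnum_ne c h]
  · simp [stepJ, h]

-- A's per-char loop builds exactly the mapped list
theorem foldl_stepA_eq (m : List Char) :
    m.foldl (fun acc c =>
      if PySem.Chars.isalnum c then acc ++ [c]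
      else if c = '-' ∨ c = '_' ∨ c = ' ' then acc ++ ['-']
      else acc ++ ['-']) [] =
    m.map (fun c => if PySem.Chars.isalnum c then c else '-') := by
  induction m using List.reverseRecOn with
  | nil => rfl
  | append_singleton t a ih =>
    rw [List.foldl_append, List.map_append, ih]
    by_cases h : PySem.Chars.isalnum a <;> simp [h]

-- core: A's collapse-and-strip pipeline equals B's single pass, on the mapped list j
theorem core_eq (j : List Char) :
    PySem.Chars.stripChars (squeeze j) ['-'] = (popHyphen ((runE false j).reverse)).reverse := by
  rw [(runE_spec j).2]
  have hp : (fun c => List.contains ['-'] c) = (fun c => c == '-') := by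
    funext c
    by_cases h : c = '-'
    · subst h; rfl
    · simp [h]
  have hstrip : PySem.Chars.stripChars (squeeze j) ['-'] =
      (List.dropWhile (fun c => c == '-') ((lstripH (squeeze j)).reverse)).reverse := by
    simp only [PySem.Chars.stripChars, hp, lstripH]
  rw [hstrip]
  congr 1
  have hchain : List.IsChain (fun a b => ¬(a = '-' ∧ b = '-')) ((lstripH (squeeze j)).reverse) := by
    refine List.isChain_reverse.mpr ?_
    refine ((isChain_squeeze j).suffix (List.dropWhile_suffix _)).imp ?_
    intro a b hab hc
    exact hab ⟨hc.2, hc.1⟩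
  cases hy : (lstripH (squeeze j)).reverse with
  | nil => rfl
  | cons c t =>
    by_cases hc : c = '-'
    · subst hc
      rw [show popHyphen ('-' :: t) = t from rfl]
      rw [List.dropWhile_cons]
      simp only [beq_self_eq_true, if_pos]
      cases t with
      | nil => rfl
      | cons d t' =>
        rw [hy] at hchain
        have hd : ¬('-' = '-' ∧ d = '-') := by
          rcases List.isChain_cons.mp hchain with ⟨h1, _⟩
          exact h1 d (by simp)
        have hd' : d ≠ '-' := fun h => hd ⟨rfl, h⟩
        simp [hd']
    · rw [show popHyphen (c :: t) = c :: t from by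
        unfold popHyphen
        split
        · next heq => injection heq with h1 _; exact absurd h1 hc
        · rfl]
      simp [hc]

-- ===== VERDICT (by name: the statement is the Claim_ definition above) =====
theorem sanitize_rds_identifier_spec : Claim_equal_sanitize_rds_identifier := by
  intro identifier _
  unfold Spec_sanitize_rds_identifier
  unfold sanitize_rds_identifier sanitize_rds_identifier_alt
  simp only [foldl_stepA_eq, foldl_stepB_eq, loopA_eq_squeeze, foldl_stepJ_eq_runE,
    core_eq, stOf, List.append_nil]
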